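-- pv_equiv track=rewrite | github.com/patni11/mysite | main/views/articles.py | left_middle_right
-- ===== SOURCE A (Python) =====
-- def left_middle_right(articles):
--     k = 0
--     left = []
--     middle = []
--     right = []
--     for each in articles:
--         if k == 0:
--             left.append(each)
--             k = 1
--         elif k == 1:
--             middle.append(each)
--             k = 2
--         elif k == 2:
--             right.append(each)
--             k = 0
--     return left,middle,right
-- ===== SOURCE B (Python) =====
-- def left_middle_right(articles):
--     xs = list(articles)
--     return xs[0::3], xs[1::3], xs[2::3]
-- ===== Notes on version B (the rewrite author's own statement) =====
-- stated objective: idiomatic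
-- what changed: Replaced the single stateful pass with a mod-3 counter and three appends by three strided slices xs[0::3], xs[1::3], xs[2::3].
import Mathlib
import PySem

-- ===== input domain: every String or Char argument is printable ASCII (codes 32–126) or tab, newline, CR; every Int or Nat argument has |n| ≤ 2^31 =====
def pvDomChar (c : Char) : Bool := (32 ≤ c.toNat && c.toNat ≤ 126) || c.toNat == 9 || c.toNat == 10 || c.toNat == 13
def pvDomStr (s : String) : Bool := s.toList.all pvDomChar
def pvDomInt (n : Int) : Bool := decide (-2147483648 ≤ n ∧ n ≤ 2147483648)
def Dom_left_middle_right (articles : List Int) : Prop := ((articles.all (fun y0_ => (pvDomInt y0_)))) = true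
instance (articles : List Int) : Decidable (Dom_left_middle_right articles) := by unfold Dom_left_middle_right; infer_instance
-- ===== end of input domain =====

-- B replaces A's single stateful pass with a mod-3 counter by three strided slices
-- xs[0::3], xs[1::3], xs[2::3] (objective: idiomatic, same cost).

-- ===== PORT A =====
-- loop body: the Python for-loop over `articles` with state (k, left, middle, right)
def pvStepA (st : Int × List Int × List Int × List Int) (each : Int) :
    Int × List Int × List Int × List Int :=
  let (k, l, m, r) := st
  if k = 0 then (1, l ++ [each], m, r)
  else if k = 1 then (2, l, m ++ [each], r)
  else if k = 2 then (0, l, m, r ++ [each])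
  else (k, l, m, r)

def left_middle_right (articles : List Int) : List Int × List Int × List Int :=
  let st := articles.foldl pvStepA (0, [], [], [])
  (st.2.1, st.2.2.1, st.2.2.2)

-- ===== PORT B =====
-- xs[i::3] is PySem.List.slice?; step 3 ≠ 0 so it is always `some`, `.getD []` just unwraps it
def left_middle_right_alt (articles : List Int) : List Int × List Int × List Int :=
  ((PySem.List.slice? articles (some 0) none 3).getD [],
   (PySem.List.slice? articles (some 1) none 3).getD [],
   (PySem.List.slice? articles (some 2) none 3).getD [])

-- ===== PRECONDITION & SPEC =====
def Spec_left_middle_right (articles : List Int) (out : List Int × List Int × List Int) : Prop := out = left_middle_right_alt articles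
instance (articles : List Int) (out : List Int × List Int × List Int) : Decidable (Spec_left_middle_right articles out) := by unfold Spec_left_middle_right; infer_instance

-- ===== CLAIM =====
def Claim_equal_left_middle_right : Prop := ∀ (articles : List Int), Dom_left_middle_right articles → Spec_left_middle_right articles (left_middle_right articles)

-- ===== LEMMAS AND PROOFS =====

-- xs[i::3] as a single function of the start index, and the tuple projection of A's state
def pvG (i : Int) (xs : List Int) : List Int :=
  (PySem.List.slice? xs (some i) none 3).getD []

def pvProj (s : Int × List Int × List Int × List Int) : List Int × List Int × List Int :=
  (s.2.1, s.2.2.1, s.2.2.2)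

-- dropping the head shifts the start of a step-3 slice down by one
lemma g_shift (x : Int) (xs : List Int) (i : Nat) (hi : 1 ≤ i) :
    PySem.List.slice? (x::xs) (some (i:Int)) none 3 =
      PySem.List.slice? xs (some ((i:Int)-1)) none 3 := by
  simp only [PySem.List.slice?, PySem.List.sliceIndices]
  norm_num
  have e1 : (if (i:Int) < 0 then max ((i:Int) + (↑xs.length + 1)) 0 else min (i:Int) (↑xs.length + 1))
      = min ((i:Int)-1) ↑xs.length + 1 := by
    rw [if_neg (by omega)]; omega
  have e2 : (if i = 0 then max ((i:Int) - 1 + ↑xs.length) 0 else min ((i:Int) - 1) ↑xs.length)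
      = min ((i:Int)-1) ↑xs.length := by
    rw [if_neg (by omega)]
  rw [e1, e2]
  have ec : (↑xs.length + 1 - (min ((i:Int)-1) ↑xs.length + 1) + 3 - 1 : Int)
      = ↑xs.length - min ((i:Int)-1) ↑xs.length + 3 - 1 := by ring
  rw [ec]
  by_cases h : min ((i:Int)-1) ↑xs.length < ↑xs.length
  · rw [if_pos (by omega), if_pos h]
    refine List.filterMap_congr ?_
    intro k _
    have hm0 : (0:Int) ≤ min ((i:Int)-1) ↑xs.length := by omega
    have e : (min ((i:Int)-1) ↑xs.length + 1 + 3 * (k:Int)).toNat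
        = (min ((i:Int)-1) ↑xs.length + 3 * (k:Int)).toNat + 1 := by omega
    rw [e]
    rfl
  · rw [if_neg (by omega), if_neg h]
    simp

-- a step-3 slice from 0 takes the head and continues from index 2 of the tail
lemma g0_cons1 (x : Int) (xs : List Int) :
  PySem.List.slice? (x::xs) (some 0) none 3 =
    (PySem.List.slice? xs (some 2) none 3).map (fun L => x :: L) := by
  match xs with
  | [] => simp [PySem.List.slice?, PySem.List.sliceIndices]
  | [d] => simp [PySem.List.slice?, PySem.List.sliceIndices]
  | [d, e] => simp [PySem.List.slice?, PySem.List.sliceIndices]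
  | d::e::f::t =>
    simp only [PySem.List.slice?, PySem.List.sliceIndices]
    norm_num
    have hmin2 : min (2:Int) (↑t.length + 1 + 1 + 1) = 2 := by omega
    have hmin0 : min (0:Int) (↑t.length + 1 + 1 + 1 + 1) = 0 := by omega
    rw [hmin2, hmin0, if_pos (by omega : (0:Int) ≤ ↑t.length + 1 + 1 + 1),
        if_pos (by omega : (2:Int) ≤ ↑t.length + 1 + 1)]
    have h1 : ((↑t.length + 1 + 1 + 1 + 1 - 0 + 3 - 1 : Int) / 3).toNat
        = ((↑t.length + 1 + 1 + 1 - 2 + 3 - 1 : Int) / 3).toNat + 1 := by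
      have e0 : (↑t.length + 1 + 1 + 1 + 1 - 0 + 3 - 1 : Int)
          = (↑t.length + 1 + 1 + 1 - 2 + 3 - 1) + 1 * 3 := by ring
      rw [e0, Int.add_mul_ediv_right _ _ (by norm_num : (3:Int) ≠ 0)]
      have : (0:Int) ≤ (↑t.length + 1 + 1 + 1 - 2 + 3 - 1) / 3 :=
        Int.ediv_nonneg (by omega) (by norm_num)
      omega
    rw [h1, List.range_succ_eq_map]
    simp only [List.filterMap_cons, List.filterMap_map]
    norm_num
    refine List.filterMap_congr ?_
    intro k _
    show (x::d::e::f::t)[(3 * ((k:Int) + 1)).toNat]? = (d::e::f::t)[(2 + 3 * (k:Int)).toNat]?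
    have e2 : (3 * ((k:Int) + 1)).toNat = (3 * k + 2) + 1 := by omega
    have e3 : (2 + 3 * (k:Int)).toNat = 3 * k + 2 := by omega
    rw [e2, e3, List.getElem?_cons_succ]

lemma slice?_step3_isSome (xs : List Int) (i : Int) :
    ∃ L, PySem.List.slice? xs (some i) none 3 = some L := by
  simp only [PySem.List.slice?]
  rw [if_neg (by norm_num : ¬(3:Int) = 0)]
  exact ⟨_, rfl⟩

lemma pvG_nil (i : Int) : pvG i [] = [] := by
  unfold pvG PySem.List.slice? PySem.List.sliceIndices
  norm_num

lemma pvG0_cons (x : Int) (xs : List Int) : pvG 0 (x::xs) = x :: pvG 2 xs := by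
  unfold pvG
  rw [g0_cons1]
  rcases slice?_step3_isSome xs 2 with ⟨L, hL⟩
  rw [hL]
  rfl

lemma pvG1_cons (x : Int) (xs : List Int) : pvG 1 (x::xs) = pvG 0 xs := by
  unfold pvG
  have h := g_shift x xs 1 le_rfl
  norm_num at h
  rw [h]

lemma pvG2_cons (x : Int) (xs : List Int) : pvG 2 (x::xs) = pvG 1 xs := by
  unfold pvG
  have h := g_shift x xs 2 (by omega)
  norm_num at h
  rw [h]

lemma key (xs : List Int) : ∀ l m r : List Int,
    pvProj (xs.foldl pvStepA (0, l, m, r)) = (l ++ pvG 0 xs, m ++ pvG 1 xs, r ++ pvG 2 xs)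
  ∧ pvProj (xs.foldl pvStepA (1, l, m, r)) = (l ++ pvG 2 xs, m ++ pvG 0 xs, r ++ pvG 1 xs)
  ∧ pvProj (xs.foldl pvStepA (2, l, m, r)) = (l ++ pvG 1 xs, m ++ pvG 2 xs, r ++ pvG 0 xs) := by
  induction xs with
  | nil => intro l m r; simp [pvProj, pvG_nil]
  | cons x t ih =>
    intro l m r
    refine ⟨?_, ?_, ?_⟩
    · show pvProj (t.foldl pvStepA (pvStepA (0, l, m, r) x)) = _
      have hs : pvStepA (0, l, m, r) x = (1, l ++ [x], m, r) := by simp [pvStepA]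
      rw [hs, (ih (l ++ [x]) m r).2.1, pvG0_cons, pvG1_cons, pvG2_cons]
      simp
    · show pvProj (t.foldl pvStepA (pvStepA (1, l, m, r) x)) = _
      have hs : pvStepA (1, l, m, r) x = (2, l, m ++ [x], r) := by simp [pvStepA]
      rw [hs, (ih l (m ++ [x]) r).2.2, pvG0_cons, pvG1_cons, pvG2_cons]
      simp
    · show pvProj (t.foldl pvStepA (pvStepA (2, l, m, r) x)) = _
      have hs : pvStepA (2, l, m, r) x = (0, l, m, r ++ [x]) := by simp [pvStepA]
      rw [hs, (ih l m (r ++ [x])).1, pvG0_cons, pvG1_cons, pvG2_cons]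
      simp

-- ===== VERDICT =====
theorem left_middle_right_spec : Claim_equal_left_middle_right := by
  intro articles _
  unfold Spec_left_middle_right left_middle_right
  have h := (key articles [] [] []).1
  simpa [pvProj, pvG, left_middle_right_alt] using h
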